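-- pv_equiv track=rewrite | github.com/md-dehghan/child-health-bibliometrics-ml-pipeline | Topic-modeling/Scripts/prepare_topic_model_data.py | apply_sequence_replacements
-- ===== SOURCE A (Python) =====
-- from typing import List, Any
-- from typing import List
--
-- def apply_sequence_replacements(tokens: List[str]) -> List[str]:
--     """
--     Make this behave like the notebook version:
--
--     - If there is at least one 'theory' 'mind' sequence:
--         * replace ALL 'tom' -> 'theory_mind'
--         * then merge ONLY THE FIRST 'theory' 'mind' pair into 'theory_mind'
--     - If there is at least one 'quality' 'life' sequence:
--         * replace ALL 'qol' -> 'quality_life'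
--         * then merge ONLY THE FIRST 'quality' 'life' pair into 'quality_life'
--     - If there is at least one 'inflammatory' 'syndrome' sequence:
--         * replace ALL 'mis' -> 'multisystem_inflammatory_syndrome'
--         * then merge ONLY THE FIRST 'multisystem' 'inflammatory' 'syndrome'
--           triple into 'multisystem_inflammatory_syndrome'
--     """
--
--     if not isinstance(tokens, list):
--         return tokens
--     tokens = list(tokens)
--
--     # ------------------------------------------------------------------
--     # 1) theory + mind / tom -> theory_mind
--     # ------------------------------------------------------------------
--     if any(tokens[i] == "theory" and tokens[i + 1] == "mind"
--            for i in range(len(tokens) - 1)):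
--         tokens = ["theory_mind" if t == "tom" else t for t in tokens]
--
--         for i in range(len(tokens) - 1):
--             if tokens[i] == "theory" and tokens[i + 1] == "mind":
--                 tokens = tokens[:i] + ["theory_mind"] + tokens[i+2:]
--                 break
--
--     # ------------------------------------------------------------------
--     # 2) quality + life / qol -> quality_life
--     # ------------------------------------------------------------------
--     if any(tokens[i] == "quality" and tokens[i + 1] == "life"
--            for i in range(len(tokens) - 1)):
--         tokens = ["quality_life" if t == "qol" else t for t in tokens]
--
--         for i in range(len(tokens) - 1):
--             if tokens[i] == "quality" and tokens[i + 1] == "life":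
--                 tokens = tokens[:i] + ["quality_life"] + tokens[i+2:]
--                 break
--
--     # ------------------------------------------------------------------
--     # 3) MIS / multisystem inflammatory syndrome
--     # ------------------------------------------------------------------
--     if any(tokens[i] == "inflammatory" and tokens[i + 1] == "syndrome"
--            for i in range(len(tokens) - 1)):
--         # Replace all 'mis' with 'multisystem_inflammatory_syndrome'
--         tokens = [
--             "multisystem_inflammatory_syndrome" if t == "mis" else t
--             for t in tokens
--         ]
--
--     for i in range(len(tokens) - 2):
--         if (tokens[i] == "multisystem"
--             and tokens[i + 1] == "inflammatory"
--             and tokens[i + 2] == "syndrome"):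
--             tokens = (
--                 tokens[:i]
--                 + ["multisystem_inflammatory_syndrome"]
--                 + tokens[i+3:]
--             )
--             break
--
--     return tokens
-- ===== SOURCE B (Python) =====
-- def apply_sequence_replacements(tokens):
--     # Single-pass rebuild: precompute the three pair flags on the original list,
--     # then one forward walk that merges the first occurrence of each sequence
--     # and applies the gated token replacements inline.
--     if not isinstance(tokens, list):
--         return tokens
--     has_tm = any(a == "theory" and b == "mind" for a, b in zip(tokens, tokens[1:]))
--     has_ql = any(a == "quality" and b == "life" for a, b in zip(tokens, tokens[1:]))
--     has_is = any(a == "inflammatory" and b == "syndrome" for a, b in zip(tokens, tokens[1:]))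
--     out = []
--     done_tm = done_ql = done_tri = False
--     i = 0
--     n = len(tokens)
--     while i < n:
--         t = tokens[i]
--         if has_tm and not done_tm and t == "theory" and i + 1 < n and tokens[i + 1] == "mind":
--             out.append("theory_mind"); done_tm = True; i += 2
--         elif has_ql and not done_ql and t == "quality" and i + 1 < n and tokens[i + 1] == "life":
--             out.append("quality_life"); done_ql = True; i += 2
--         elif (not done_tri and t == "multisystem" and i + 2 < n
--               and tokens[i + 1] == "inflammatory" and tokens[i + 2] == "syndrome"):
--             out.append("multisystem_inflammatory_syndrome"); done_tri = True; i += 3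
--         else:
--             if has_tm and t == "tom":
--                 out.append("theory_mind")
--             elif has_ql and t == "qol":
--                 out.append("quality_life")
--             elif has_is and t == "mis":
--                 out.append("multisystem_inflammatory_syndrome")
--             else:
--                 out.append(t)
--             i += 1
--     return out
-- ===== Notes on version B (the rewrite author's own statement) =====
-- stated objective: alternative
-- what changed: A runs up to seven passes over the list (three adjacency scans, three full-list replacement comprehensions, three find-and-splice merge loops); B precomputes the three pair flags on the original list and then rebuilds the result in one single forward pass that merges the first occurrence of each sequence and applies the gated replacements inline.
import Mathlib
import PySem

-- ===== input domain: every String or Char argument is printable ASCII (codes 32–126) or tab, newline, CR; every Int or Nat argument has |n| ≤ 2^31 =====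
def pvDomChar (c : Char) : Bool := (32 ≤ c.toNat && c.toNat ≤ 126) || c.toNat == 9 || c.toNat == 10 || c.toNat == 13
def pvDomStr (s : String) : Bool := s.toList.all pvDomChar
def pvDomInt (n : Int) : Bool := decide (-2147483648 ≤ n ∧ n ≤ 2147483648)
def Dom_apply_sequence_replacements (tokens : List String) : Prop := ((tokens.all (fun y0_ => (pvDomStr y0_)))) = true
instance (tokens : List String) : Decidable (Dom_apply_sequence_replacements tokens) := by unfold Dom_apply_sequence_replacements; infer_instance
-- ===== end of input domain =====

-- B rebuilds the result in ONE forward pass (flags precomputed on the original list)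
-- instead of A's sequence of detection scans, comprehensions and slice rebuilds; objective: alternative.

-- ===== PORT A =====
-- the three list-comprehension replacements of A
def fT (t : String) : String := if t = "tom" then "theory_mind" else t
def fQ (t : String) : String := if t = "qol" then "quality_life" else t
def fI (t : String) : String := if t = "mis" then "multisystem_inflammatory_syndrome" else t

-- A's 'any(tokens[i] == p and tokens[i+1] == q for i in range(len(tokens)-1))'
def hasPairA (p q : String) : List String → Bool
  | t :: u :: rest => if t = p ∧ u = q then true else hasPairA p q (u :: rest)
  | _ => false

-- A's 'for i in range(len-1): if pair: tokens = tokens[:i] + [c] + tokens[i+2:]; break'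
def mergeFirst2 (a b c : String) : List String → List String
  | t :: u :: rest => if t = a ∧ u = b then c :: rest else t :: mergeFirst2 a b c (u :: rest)
  | l => l

-- A's unconditional triple-merge loop with break
def mergeFirst3 : List String → List String
  | t :: u :: v :: rest =>
      if t = "multisystem" ∧ u = "inflammatory" ∧ v = "syndrome" then
        "multisystem_inflammatory_syndrome" :: rest
      else t :: mergeFirst3 (u :: v :: rest)
  | l => l

def apply_sequence_replacements (tokens : List String) : List String :=
  let t1 := if hasPairA "theory" "mind" tokens = true then
      mergeFirst2 "theory" "mind" "theory_mind" (tokens.map fT)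
    else tokens
  let t2 := if hasPairA "quality" "life" t1 = true then
      mergeFirst2 "quality" "life" "quality_life" (t1.map fQ)
    else t1
  let t3 := if hasPairA "inflammatory" "syndrome" t2 = true then t2.map fI else t2
  mergeFirst3 t3

-- ===== PORT B =====
-- B's 'any(a == p and b == q for a, b in zip(tokens, tokens[1:]))'
def pairFlag (p q : String) (l : List String) : Bool :=
  (l.zip l.tail).any (fun ab => decide (ab.1 = p ∧ ab.2 = q))

-- B's gated single-token replacement chain (the else-branch of the walk)
def replTok (tm ql infl : Bool) (t : String) : String :=
  if tm = true ∧ t = "tom" then "theory_mind"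
  else if ql = true ∧ t = "qol" then "quality_life"
  else if infl = true ∧ t = "mis" then "multisystem_inflammatory_syndrome"
  else t

-- B's single forward walk with the three 'done' flags
def goB (tm ql infl d1 d2 d3 : Bool) : List String → List String
  | [] => []
  | t :: rest =>
    if tm = true ∧ d1 = false ∧ t = "theory" ∧ rest.head? = some "mind" then
      "theory_mind" :: goB tm ql infl true d2 d3 rest.tail
    else if ql = true ∧ d2 = false ∧ t = "quality" ∧ rest.head? = some "life" then
      "quality_life" :: goB tm ql infl d1 true d3 rest.tail
    else if d3 = false ∧ t = "multisystem" ∧ rest.head? = some "inflammatory" ∧ rest.tail.head? = some "syndrome" then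
      "multisystem_inflammatory_syndrome" :: goB tm ql infl d1 d2 true rest.tail.tail
    else
      replTok tm ql infl t :: goB tm ql infl d1 d2 d3 rest
termination_by l => l.length
decreasing_by
  all_goals simp [List.length_tail]
  all_goals omega

def apply_sequence_replacements_alt (tokens : List String) : List String :=
  goB (pairFlag "theory" "mind" tokens) (pairFlag "quality" "life" tokens)
      (pairFlag "inflammatory" "syndrome" tokens) false false false tokens

-- ===== PRECONDITION & SPEC =====
def Spec_apply_sequence_replacements (tokens : List String) (out : List String) : Prop := out = apply_sequence_replacements_alt tokens
instance (tokens : List String) (out : List String) : Decidable (Spec_apply_sequence_replacements tokens out) := by unfold Spec_apply_sequence_replacements; infer_instance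

-- ===== CLAIM (what is proved, stated in full; the proofs are below) =====
def Claim_equal_apply_sequence_replacements : Prop := ∀ (tokens : List String), Dom_apply_sequence_replacements tokens → Spec_apply_sequence_replacements tokens (apply_sequence_replacements tokens)

-- ===== LEMMAS AND PROOFS =====

-- conditional merges (proof-side normal form for both pipelines)
def cm2 (a b c : String) (flag d : Bool) (X : List String) : List String :=
  if flag = true ∧ d = false then mergeFirst2 a b c X else X
def cm3 (d : Bool) (X : List String) : List String :=
  if d = false then mergeFirst3 X else X

theorem flag_eq (p q : String) (l : List String) : pairFlag p q l = hasPairA p q l := by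
  induction l with
  | nil => rfl
  | cons t rest ih =>
    cases rest with
    | nil => rfl
    | cons u r =>
      have e : pairFlag p q (t :: u :: r) = ((decide (t = p ∧ u = q)) || pairFlag p q (u :: r)) := by
        simp [pairFlag]
      rw [e, ih]
      by_cases h : t = p ∧ u = q
      · simp [hasPairA, h]
      · simp [hasPairA, h]

theorem merge2_cons (a b c t : String) (X : List String)
    (h : ¬(t = a ∧ X.head? = some b)) :
    mergeFirst2 a b c (t :: X) = t :: mergeFirst2 a b c X := by
  cases X with
  | nil => rfl
  | cons u r => simp only [mergeFirst2]; rw [if_neg (by simp_all)]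

theorem merge3_cons (t : String) (X : List String)
    (h : ¬(t = "multisystem" ∧ X.head? = some "inflammatory" ∧ X.tail.head? = some "syndrome")) :
    mergeFirst3 (t :: X) = t :: mergeFirst3 X := by
  match X with
  | [] => rfl
  | [u] => rfl
  | u :: v :: r => simp only [mergeFirst3]; rw [if_neg (by simp_all)]

theorem merge2_head (a b c : String) (X : List String) :
    (mergeFirst2 a b c X).head? = some c ∨ (mergeFirst2 a b c X).head? = X.head? := by
  match X with
  | [] => right; rfl
  | [t] => right; rfl
  | t :: u :: r =>
    by_cases h : t = a ∧ u = b <;> simp [mergeFirst2, h]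

theorem merge2_second (a b c : String) (X : List String) :
    (mergeFirst2 a b c X).head? = some c ∨
      ((mergeFirst2 a b c X).head? = X.head? ∧
        ((mergeFirst2 a b c X).tail.head? = some c ∨
          (mergeFirst2 a b c X).tail.head? = X.tail.head?)) := by
  match X with
  | [] => right; exact ⟨rfl, Or.inr rfl⟩
  | [t] => right; exact ⟨rfl, Or.inr rfl⟩
  | t :: u :: r =>
    by_cases h : t = a ∧ u = b
    · left; simp [mergeFirst2, h]
    · right
      constructor
      · simp [mergeFirst2, h]
      · have := merge2_head a b c (u :: r)
        simp only [mergeFirst2, if_neg h]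
        simpa using this

theorem cm2_cons (a b c : String) (flag d : Bool) (t : String) (X : List String)
    (h : ¬(flag = true ∧ d = false ∧ t = a ∧ X.head? = some b)) :
    cm2 a b c flag d (t :: X) = t :: cm2 a b c flag d X := by
  unfold cm2
  split_ifs with hg
  · exact merge2_cons a b c t X (by tauto)
  · rfl

theorem cm3_cons (d : Bool) (t : String) (X : List String)
    (h : ¬(d = false ∧ t = "multisystem" ∧ X.head? = some "inflammatory" ∧ X.tail.head? = some "syndrome")) :
    cm3 d (t :: X) = t :: cm3 d X := by
  unfold cm3
  split_ifs with hg
  · exact merge3_cons t X (by tauto)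
  · rfl

theorem cm2_second (a b c : String) (flag d : Bool) (X : List String) :
    (cm2 a b c flag d X).head? = some c ∨
      ((cm2 a b c flag d X).head? = X.head? ∧
        ((cm2 a b c flag d X).tail.head? = some c ∨
          (cm2 a b c flag d X).tail.head? = X.tail.head?)) := by
  unfold cm2
  split_ifs with hg
  · exact merge2_second a b c X
  · right; exact ⟨rfl, Or.inr rfl⟩

theorem repl_fix (tm ql infl : Bool) (s : String)
    (h1 : s ≠ "tom") (h2 : s ≠ "qol") (h3 : s ≠ "mis") :
    replTok tm ql infl s = s := by
  unfold replTok; split_ifs <;> simp_all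

theorem repl_reflect (tm ql infl : Bool) (x s : String)
    (h4 : s ≠ "theory_mind") (h5 : s ≠ "quality_life") (h6 : s ≠ "multisystem_inflammatory_syndrome")
    (h : replTok tm ql infl x = s) : x = s := by
  unfold replTok at h; split_ifs at h <;> simp_all

theorem cm2_merge_head (a b c : String) (flag d : Bool) (hf : flag = true) (hd : d = false) (X : List String) :
    cm2 a b c flag d (a :: b :: X) = c :: X := by
  unfold cm2; rw [if_pos ⟨hf, hd⟩]; simp [mergeFirst2]

theorem cm3_merge_head (d : Bool) (hd : d = false) (X : List String) :
    cm3 d ("multisystem" :: "inflammatory" :: "syndrome" :: X) = "multisystem_inflammatory_syndrome" :: X := by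
  unfold cm3; rw [if_pos hd]; simp [mergeFirst3]

theorem cm2_skip (a b c : String) (flag : Bool) (X : List String) : cm2 a b c flag true X = X := by
  unfold cm2; simp

theorem cm3_skip (X : List String) : cm3 true X = X := by
  unfold cm3; simp

theorem head_repl (tm ql infl : Bool) (rest : List String) (s : String)
    (h4 : s ≠ "theory_mind") (h5 : s ≠ "quality_life") (h6 : s ≠ "multisystem_inflammatory_syndrome")
    (h : (rest.map (replTok tm ql infl)).head? = some s) : rest.head? = some s := by
  rw [List.head?_map] at h
  cases hu : rest.head? with
  | none => rw [hu] at h; exact absurd h (by simp)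
  | some x =>
    rw [hu] at h
    simp only [Option.map_some, Option.some.injEq] at h
    exact congrArg some (repl_reflect tm ql infl x s h4 h5 h6 h)

-- the main normal-form lemma for B's single pass
theorem goB_eq (tm ql infl : Bool) : ∀ (n : Nat) (l : List String), l.length ≤ n → ∀ (d1 d2 d3 : Bool),
    goB tm ql infl d1 d2 d3 l =
      cm3 d3 (cm2 "quality" "life" "quality_life" ql d2
        (cm2 "theory" "mind" "theory_mind" tm d1 (l.map (replTok tm ql infl)))) := by
  intro n
  induction n with
  | zero =>
    intro l hl d1 d2 d3
    have hnil : l = [] := List.length_eq_zero_iff.mp (Nat.le_zero.mp hl)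
    subst hnil
    simp only [List.map_nil]
    rw [show goB tm ql infl d1 d2 d3 [] = [] from by rw [goB]]
    unfold cm2 cm3
    split_ifs <;> simp [mergeFirst2, mergeFirst3]
  | succ n IH =>
    intro l hl d1 d2 d3
    cases l with
    | nil =>
      simp only [List.map_nil]
      rw [show goB tm ql infl d1 d2 d3 [] = [] from by rw [goB]]
      unfold cm2 cm3
      split_ifs <;> simp [mergeFirst2, mergeFirst3]
    | cons t rest =>
      have hrest : rest.length ≤ n := by simp at hl; omega
      rw [goB]
      split_ifs with h1 h2 h3
      · -- theory/mind merge
        obtain ⟨htm, hd1, ht, hh⟩ := h1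
        cases rest with
        | nil => simp at hh
        | cons u r =>
          have hu : u = "mind" := by simpa using hh
          subst ht; subst hu
          have hr : r.length ≤ n := by simp at hrest; omega
          simp only [List.tail_cons]
          rw [IH r hr true d2 d3, cm2_skip]
          rw [show ((("theory" : String) :: "mind" :: r).map (replTok tm ql infl))
              = "theory" :: "mind" :: r.map (replTok tm ql infl) from by simp [repl_fix]]
          rw [cm2_merge_head _ _ _ _ _ htm hd1]
          rw [cm2_cons _ _ _ _ _ _ _ (by simp)]
          rw [cm3_cons _ _ _ (by simp)]
      · -- quality/life merge
        obtain ⟨hql, hd2, ht, hh⟩ := h2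
        cases rest with
        | nil => simp at hh
        | cons u r =>
          have hu : u = "life" := by simpa using hh
          subst ht; subst hu
          have hr : r.length ≤ n := by simp at hrest; omega
          simp only [List.tail_cons]
          rw [IH r hr d1 true d3, cm2_skip]
          rw [show ((("quality" : String) :: "life" :: r).map (replTok tm ql infl))
              = "quality" :: "life" :: r.map (replTok tm ql infl) from by simp [repl_fix]]
          rw [cm2_cons "theory" "mind" "theory_mind" tm d1 "quality" _ (by simp),
            cm2_cons "theory" "mind" "theory_mind" tm d1 "life" _ (by simp)]
          rw [cm2_merge_head "quality" "life" "quality_life" ql d2 hql hd2]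
          rw [cm3_cons _ _ _ (by simp)]
      · -- triple merge
        obtain ⟨hd3, ht, hh1, hh2⟩ := h3
        cases rest with
        | nil => simp at hh1
        | cons u r =>
          have hu : u = "inflammatory" := by simpa using hh1
          cases r with
          | nil => simp at hh2
          | cons v r2 =>
            have hv : v = "syndrome" := by simpa using hh2
            subst ht; subst hu; subst hv
            have hr : r2.length ≤ n := by simp at hrest; omega
            simp only [List.tail_cons]
            rw [IH r2 hr d1 d2 true, cm3_skip]
            rw [show ((("multisystem" : String) :: "inflammatory" :: "syndrome" :: r2).map (replTok tm ql infl))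
                = "multisystem" :: "inflammatory" :: "syndrome" :: r2.map (replTok tm ql infl) from by
              simp [repl_fix]]
            rw [cm2_cons "theory" "mind" "theory_mind" tm d1 "multisystem" _ (by simp),
              cm2_cons "theory" "mind" "theory_mind" tm d1 "inflammatory" _ (by simp),
              cm2_cons "theory" "mind" "theory_mind" tm d1 "syndrome" _ (by simp)]
            rw [cm2_cons "quality" "life" "quality_life" ql d2 "multisystem" _ (by simp),
              cm2_cons "quality" "life" "quality_life" ql d2 "inflammatory" _ (by simp),
              cm2_cons "quality" "life" "quality_life" ql d2 "syndrome" _ (by simp)]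
            rw [cm3_merge_head _ hd3]
      · -- no merge at this position
        rw [IH rest hrest d1 d2 d3]
        rw [show ((t :: rest).map (replTok tm ql infl))
            = replTok tm ql infl t :: rest.map (replTok tm ql infl) from rfl]
        have e1 : ¬(tm = true ∧ d1 = false ∧ replTok tm ql infl t = "theory" ∧
            (rest.map (replTok tm ql infl)).head? = some "mind") := by
          rintro ⟨htm, hd1, hteq, hhead⟩
          exact h1 ⟨htm, hd1, repl_reflect tm ql infl t "theory" (by decide) (by decide) (by decide) hteq,
            head_repl tm ql infl rest "mind" (by decide) (by decide) (by decide) hhead⟩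
        rw [cm2_cons _ _ _ _ _ _ _ e1]
        have e2 : ¬(ql = true ∧ d2 = false ∧ replTok tm ql infl t = "quality" ∧
            (cm2 "theory" "mind" "theory_mind" tm d1 (rest.map (replTok tm ql infl))).head? = some "life") := by
          rintro ⟨hql, hd2, hteq, hhead⟩
          apply h2
          refine ⟨hql, hd2, repl_reflect tm ql infl t "quality" (by decide) (by decide) (by decide) hteq, ?_⟩
          rcases cm2_second "theory" "mind" "theory_mind" tm d1 (rest.map (replTok tm ql infl)) with hc | ⟨hhd, _⟩
          · rw [hc] at hhead; simp at hhead
          · rw [hhd] at hhead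
            exact head_repl tm ql infl rest "life" (by decide) (by decide) (by decide) hhead
        rw [cm2_cons _ _ _ _ _ _ _ e2]
        have e3 : ¬(d3 = false ∧ replTok tm ql infl t = "multisystem" ∧
            (cm2 "quality" "life" "quality_life" ql d2
              (cm2 "theory" "mind" "theory_mind" tm d1 (rest.map (replTok tm ql infl)))).head? = some "inflammatory" ∧
            (cm2 "quality" "life" "quality_life" ql d2
              (cm2 "theory" "mind" "theory_mind" tm d1 (rest.map (replTok tm ql infl)))).tail.head? = some "syndrome") := by
          rintro ⟨hd3, hteq, hA, hB⟩
          apply h3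
          have hWa : (cm2 "theory" "mind" "theory_mind" tm d1 (rest.map (replTok tm ql infl))).head? = some "inflammatory" ∧
              (cm2 "theory" "mind" "theory_mind" tm d1 (rest.map (replTok tm ql infl))).tail.head? = some "syndrome" := by
            rcases cm2_second "quality" "life" "quality_life" ql d2
                (cm2 "theory" "mind" "theory_mind" tm d1 (rest.map (replTok tm ql infl))) with hc | ⟨hhd, hsec⟩
            · rw [hc] at hA; simp at hA
            · rw [hhd] at hA
              rcases hsec with hc2 | hc2
              · rw [hc2] at hB; simp at hB
              · rw [hc2] at hB; exact ⟨hA, hB⟩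
          have hYa : (rest.map (replTok tm ql infl)).head? = some "inflammatory" ∧
              (rest.map (replTok tm ql infl)).tail.head? = some "syndrome" := by
            rcases cm2_second "theory" "mind" "theory_mind" tm d1 (rest.map (replTok tm ql infl)) with hc | ⟨hhd, hsec⟩
            · rw [hc] at hWa; simp at hWa
            · rcases hsec with hc2 | hc2
              · rw [hc2] at hWa; simp at hWa
              · rw [hhd, hc2] at hWa; exact hWa
          have htl : (rest.map (replTok tm ql infl)).tail = rest.tail.map (replTok tm ql infl) := by
            cases rest <;> rfl
          refine ⟨hd3, repl_reflect tm ql infl t "multisystem" (by decide) (by decide) (by decide) hteq,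
            head_repl tm ql infl rest "inflammatory" (by decide) (by decide) (by decide) hYa.1, ?_⟩
          have := hYa.2
          rw [htl] at this
          exact head_repl tm ql infl rest.tail "syndrome" (by decide) (by decide) (by decide) this
        rw [cm3_cons _ _ _ e3]

-- map/detection facts used to normalise A's pipeline
theorem merge2_map (a b c : String) (f : String → String)
    (ha : ∀ x, f x = a ↔ x = a) (hb : ∀ x, f x = b ↔ x = b) (hc : f c = c) :
    ∀ X : List String, mergeFirst2 a b c (X.map f) = (mergeFirst2 a b c X).map f := by
  intro X
  induction X with
  | nil => rfl
  | cons t rest ih =>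
    cases rest with
    | nil => rfl
    | cons u r =>
      by_cases h : t = a ∧ u = b
      · obtain ⟨ht, hu⟩ := h
        subst ht; subst hu
        rw [show (List.map f (t :: u :: r)) = f t :: f u :: List.map f r from rfl,
          (ha t).mpr rfl, (hb u).mpr rfl]
        simp [mergeFirst2, hc]
      · have h' : ¬(f t = a ∧ f u = b) := by
          intro hf; exact h ⟨(ha t).mp hf.1, (hb u).mp hf.2⟩
        simp only [List.map_cons, mergeFirst2, if_neg h, if_neg h']
        have e : f u :: List.map f r = List.map f (u :: r) := rfl
        rw [e, ih]

theorem haspair_map (p q : String) (f : String → String)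
    (hp : ∀ x, f x = p ↔ x = p) (hq : ∀ x, f x = q ↔ x = q) :
    ∀ X : List String, hasPairA p q (X.map f) = hasPairA p q X := by
  intro X
  induction X with
  | nil => rfl
  | cons t rest ih =>
    cases rest with
    | nil => rfl
    | cons u r =>
      have h' : (f t = p ∧ f u = q) ↔ (t = p ∧ u = q) := by
        constructor
        · intro hf; exact ⟨(hp t).mp hf.1, (hq u).mp hf.2⟩
        · intro hf; exact ⟨(hp t).mpr hf.1, (hq u).mpr hf.2⟩
      by_cases h : t = p ∧ u = q
      · obtain ⟨ht, hu⟩ := h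
        subst ht; subst hu
        rw [show List.map f (t :: u :: r) = f t :: f u :: List.map f r from rfl,
          (hp t).mpr rfl, (hq u).mpr rfl]
        simp [hasPairA]
      · simp only [List.map_cons, hasPairA, if_neg h, if_neg (fun hf => h (h'.mp hf))]
        have e : f u :: List.map f r = List.map f (u :: r) := rfl
        rw [e]
        exact ih

theorem haspair_cons (p q t : String) (Y : List String) :
    hasPairA p q (t :: Y) = if t = p ∧ Y.head? = some q then true else hasPairA p q Y := by
  cases Y with
  | nil => simp [hasPairA]
  | cons u r => simp [hasPairA]

theorem haspair_merge2 (p q a b c : String)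
    (h1 : a ≠ p) (h2 : b ≠ p) (h3 : c ≠ p) (h4 : a ≠ q) (h5 : c ≠ q) :
    ∀ X : List String, hasPairA p q (mergeFirst2 a b c X) = hasPairA p q X := by
  intro X
  induction X with
  | nil => rfl
  | cons t rest ih =>
    cases rest with
    | nil => rfl
    | cons u r =>
      by_cases h : t = a ∧ u = b
      · obtain ⟨ht, hu⟩ := h
        subst ht; subst hu
        rw [show mergeFirst2 t u c (t :: u :: r) = c :: r from by simp [mergeFirst2]]
        rw [haspair_cons, if_neg (fun hh => h3 hh.1)]
        rw [haspair_cons, if_neg (fun hh => h1 hh.1)]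
        rw [haspair_cons, if_neg (fun hh => h2 hh.1)]
      · rw [show mergeFirst2 a b c (t :: u :: r) = t :: mergeFirst2 a b c (u :: r) from by
          simp only [mergeFirst2, if_neg h]]
        rw [haspair_cons, haspair_cons, ih]
        by_cases hm : u = a ∧ r.head? = some b
        · obtain ⟨hu, hr⟩ := hm
          cases r with
          | nil => simp at hr
          | cons v r2 =>
            have hv : v = b := by simpa using hr
            subst hu; subst hv
            rw [show mergeFirst2 u v c (u :: v :: r2) = c :: r2 from by simp [mergeFirst2]]
            rw [if_neg (fun hh => h5 (Option.some.inj hh.2))]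
            rw [if_neg (fun hh => h4 (by simpa using hh.2 : u = q))]
        · rw [merge2_cons a b c u r hm]
          simp

theorem repl_point (tm ql infl : Bool) (x : String) :
    replTok tm ql infl x = (fun t => if infl = true ∧ t = "mis" then "multisystem_inflammatory_syndrome" else t)
      ((fun t => if ql = true ∧ t = "qol" then "quality_life" else t)
        ((fun t => if tm = true ∧ t = "tom" then "theory_mind" else t) x)) := by
  unfold replTok
  split_ifs <;> simp_all <;> split_ifs <;> simp_all

theorem repl_decomp (tm ql infl : Bool) (l : List String) :
    l.map (replTok tm ql infl) =
      (if infl = true then ((if ql = true then ((if tm = true then l.map fT else l)).map fQ else (if tm = true then l.map fT else l))).map fI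
       else (if ql = true then ((if tm = true then l.map fT else l)).map fQ else (if tm = true then l.map fT else l))) := by
  cases tm <;> cases ql <;> cases infl <;>
    · refine Eq.trans (List.map_congr_left fun x _ => repl_point _ _ _ x) ?_
      simp [fI, fQ, fT, List.map_map, Function.comp]

theorem fone_iff (a r x s : String) (h1 : s ≠ a) (h2 : s ≠ r) :
    (if x = a then r else x) = s ↔ x = s := by
  split_ifs with h <;> constructor <;> intro e <;> simp_all

theorem commTQ (X : List String) :
    mergeFirst2 "theory" "mind" "theory_mind" (X.map fQ)
      = (mergeFirst2 "theory" "mind" "theory_mind" X).map fQ :=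
  merge2_map _ _ _ fQ (fun x => by unfold fQ; exact fone_iff _ _ _ _ (by decide) (by decide))
    (fun x => by unfold fQ; exact fone_iff _ _ _ _ (by decide) (by decide)) (by decide) X

theorem commTI (X : List String) :
    mergeFirst2 "theory" "mind" "theory_mind" (X.map fI)
      = (mergeFirst2 "theory" "mind" "theory_mind" X).map fI :=
  merge2_map _ _ _ fI (fun x => by unfold fI; exact fone_iff _ _ _ _ (by decide) (by decide))
    (fun x => by unfold fI; exact fone_iff _ _ _ _ (by decide) (by decide)) (by decide) X

theorem commQI (X : List String) :
    mergeFirst2 "quality" "life" "quality_life" (X.map fI)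
      = (mergeFirst2 "quality" "life" "quality_life" X).map fI :=
  merge2_map _ _ _ fI (fun x => by unfold fI; exact fone_iff _ _ _ _ (by decide) (by decide))
    (fun x => by unfold fI; exact fone_iff _ _ _ _ (by decide) (by decide)) (by decide) X

theorem inv_q_T (X : List String) :
    hasPairA "quality" "life" (X.map fT) = hasPairA "quality" "life" X :=
  haspair_map _ _ fT (fun x => by unfold fT; exact fone_iff _ _ _ _ (by decide) (by decide))
    (fun x => by unfold fT; exact fone_iff _ _ _ _ (by decide) (by decide)) X

theorem inv_q_M1 (X : List String) :
    hasPairA "quality" "life" (mergeFirst2 "theory" "mind" "theory_mind" X)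
      = hasPairA "quality" "life" X :=
  haspair_merge2 _ _ _ _ _ (by decide) (by decide) (by decide) (by decide) (by decide) X

theorem inv_i_T (X : List String) :
    hasPairA "inflammatory" "syndrome" (X.map fT) = hasPairA "inflammatory" "syndrome" X :=
  haspair_map _ _ fT (fun x => by unfold fT; exact fone_iff _ _ _ _ (by decide) (by decide))
    (fun x => by unfold fT; exact fone_iff _ _ _ _ (by decide) (by decide)) X

theorem inv_i_Q (X : List String) :
    hasPairA "inflammatory" "syndrome" (X.map fQ) = hasPairA "inflammatory" "syndrome" X :=
  haspair_map _ _ fQ (fun x => by unfold fQ; exact fone_iff _ _ _ _ (by decide) (by decide))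
    (fun x => by unfold fQ; exact fone_iff _ _ _ _ (by decide) (by decide)) X

theorem inv_i_M1 (X : List String) :
    hasPairA "inflammatory" "syndrome" (mergeFirst2 "theory" "mind" "theory_mind" X)
      = hasPairA "inflammatory" "syndrome" X :=
  haspair_merge2 _ _ _ _ _ (by decide) (by decide) (by decide) (by decide) (by decide) X

theorem inv_i_M2 (X : List String) :
    hasPairA "inflammatory" "syndrome" (mergeFirst2 "quality" "life" "quality_life" X)
      = hasPairA "inflammatory" "syndrome" X :=
  haspair_merge2 _ _ _ _ _ (by decide) (by decide) (by decide) (by decide) (by decide) X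

-- ===== VERDICT (by name: the statement is the Claim_ definition above) =====
theorem apply_sequence_replacements_spec : Claim_equal_apply_sequence_replacements := by
  intro tokens _
  unfold Spec_apply_sequence_replacements apply_sequence_replacements apply_sequence_replacements_alt
  rw [flag_eq, flag_eq, flag_eq]
  cases htm : hasPairA "theory" "mind" tokens <;>
    cases hql : hasPairA "quality" "life" tokens <;>
      cases hinfl : hasPairA "inflammatory" "syndrome" tokens <;>
    simp only [htm, hql, hinfl, inv_q_T, inv_q_M1, inv_i_T, inv_i_Q, inv_i_M1, inv_i_M2,
      Bool.false_eq_true, if_true, if_false, reduceIte] <;>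
    rw [goB_eq _ _ _ tokens.length tokens le_rfl false false false] <;>
    simp only [cm2, cm3, Bool.false_eq_true, and_true, and_false, if_true, if_false, reduceIte] <;>
    rw [repl_decomp] <;>
    simp only [Bool.false_eq_true, if_true, if_false, reduceIte, commTQ, commTI, commQI]
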